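-- pv_equiv track=rewrite | github.com/Shock55/pandora_cherwell_library | monlib/landscapelib/utils.py | count_dublicated
-- ===== SOURCE A (Python) =====
-- from typing import Dict
-- from typing import List
--
-- def count_dublicated(seq: List) -> Dict[str, int]:
--     res = {}
--     for i in seq:
--         counter = seq.count(i)
--         if counter > 1:
--             res[i] = counter
--         else:
--             continue
--     return res
-- ===== SOURCE B (Python) =====
-- def count_dublicated(seq):
--     res = {}
--     rest = list(seq)
--     while rest:
--         x = rest[0]
--         c = rest.count(x)
--         if c > 1:
--             res[x] = c
--         rest = [y for y in rest if y != x]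
--     return res
-- ===== Notes on version B (the rewrite author's own statement) =====
-- stated objective: alternative
-- what changed: B repeatedly extracts the first remaining value, counts it once in the shrinking worklist, and strips all its occurrences before continuing, instead of A's per-element rescans of the full seq with dict deduplication.
import Mathlib
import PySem

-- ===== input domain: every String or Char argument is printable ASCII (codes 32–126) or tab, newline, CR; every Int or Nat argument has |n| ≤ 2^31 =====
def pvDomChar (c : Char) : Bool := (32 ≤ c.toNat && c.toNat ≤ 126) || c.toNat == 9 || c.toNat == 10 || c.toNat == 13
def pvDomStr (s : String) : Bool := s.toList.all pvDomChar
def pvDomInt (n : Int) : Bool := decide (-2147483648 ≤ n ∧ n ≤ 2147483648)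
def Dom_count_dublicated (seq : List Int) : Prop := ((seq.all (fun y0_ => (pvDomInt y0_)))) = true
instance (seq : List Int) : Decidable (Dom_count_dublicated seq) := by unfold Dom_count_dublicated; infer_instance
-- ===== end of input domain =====

-- B is an alternative algorithm: it repeatedly counts the first remaining value in a
-- shrinking worklist and strips all its occurrences, instead of A's per-element
-- rescans of the full seq with dict deduplication (objective: alternative).

-- ===== PORT A =====
-- for i in seq: counter = seq.count(i); if counter > 1: res[i] = counter
def count_dublicated (seq : List Int) : List (Int × Int) :=
  (seq.foldl (fun res i =>
      let counter : Int := (PySem.List.count seq i : Int)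
      if counter > 1 then res.insert i counter else res)
    (PySem.Dict.empty : PySem.Dict Int Int)).items

-- ===== PORT B =====
-- while rest: x = rest[0]; c = rest.count(x); if c > 1: res[x] = c;
--   rest = [y for y in rest if y != x]
def cdStrip (rest : List Int) (res : PySem.Dict Int Int) : List (Int × Int) :=
  match rest with
  | [] => res.items
  | x :: t =>
    let c : Int := (PySem.List.count (x :: t) x : Int)
    cdStrip ((x :: t).filter (fun y => !(y == x)))
      (if c > 1 then res.insert x c else res)
termination_by rest.length
decreasing_by
  simp only [List.filter_cons, beq_self_eq_true, Bool.not_true, List.length_cons]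
  exact Nat.lt_succ_of_le (List.length_filter_le _ t)

def count_dublicated_alt (seq : List Int) : List (Int × Int) :=
  cdStrip seq (PySem.Dict.empty : PySem.Dict Int Int)

-- ===== PRECONDITION & SPEC =====
def Spec_count_dublicated (seq : List Int) (out : List (Int × Int)) : Prop := out = count_dublicated_alt seq
instance (seq : List Int) (out : List (Int × Int)) : Decidable (Spec_count_dublicated seq out) := by unfold Spec_count_dublicated; infer_instance

-- ===== CLAIM (what is proved, stated in full; the proofs are below) =====
def Claim_equal_count_dublicated : Prop := ∀ (seq : List Int), Dom_count_dublicated seq → Spec_count_dublicated seq (count_dublicated seq)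

-- ===== LEMMAS AND PROOFS =====

-- canonical value of both programs on a worklist l (counts taken inside l)
def dupSpec (l : List Int) : List (Int × Int) :=
  ((PySem.Set.ofList l).filter (fun k => decide ((1:Int) < (PySem.List.count l k : Int)))).map
    (fun k => (k, (PySem.List.count l k : Int)))

-- ---------- A side ----------

-- A fold that inserts a key-determined value: items = the updated key set, mapped.
lemma items_foldl_insert_fun (f : Int → Int) :
    ∀ (l s : List Int), s.Nodup →
      (l.foldl (fun d k => d.insert k (f k))
          (PySem.Dict.mk (s.map (fun k => (k, f k))))).items
        = (PySem.Set.update s l).map (fun k => (k, f k)) := by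
  intro l
  induction l with
  | nil => intro s _; simp [PySem.Set.update]
  | cons a l ih =>
    intro s hs
    rw [List.foldl_cons, PySem.Set.update_cons]
    by_cases hmem : a ∈ s
    · have hc : (PySem.Dict.mk (s.map (fun k => (k, f k)))).contains a = true := by
        rw [PySem.Dict.contains_mk]
        simp only [List.any_map, List.any_eq_true]
        exact ⟨a, hmem, by simp⟩
      have hins : (PySem.Dict.mk (s.map (fun k => (k, f k)))).insert a (f a)
          = PySem.Dict.mk (s.map (fun k => (k, f k))) := by
        apply PySem.Dict.ext
        rw [PySem.Dict.items_insert_of_contains _ _ hc]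
        show _ = (PySem.Dict.mk (s.map (fun k => (k, f k)))).items
        show List.map _ (s.map (fun k => (k, f k))) = s.map (fun k => (k, f k))
        rw [List.map_map]
        apply List.map_congr_left
        intro k _
        simp only [Function.comp]
        by_cases hk : k = a
        · subst hk; simp
        · simp [hk]
      rw [hins, PySem.Set.add_of_mem hmem]
      exact ih s hs
    · have hc : (PySem.Dict.mk (s.map (fun k => (k, f k)))).contains a = false := by
        rw [PySem.Dict.contains_mk]
        simp only [List.any_map, List.any_eq_false]
        intro k hk
        simp only [Function.comp]
        simp only [beq_iff_eq]
        intro h; exact hmem (h ▸ hk)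
      have hins : (PySem.Dict.mk (s.map (fun k => (k, f k)))).insert a (f a)
          = PySem.Dict.mk ((s ++ [a]).map (fun k => (k, f k))) := by
        apply PySem.Dict.ext
        rw [PySem.Dict.items_insert_of_not_contains _ _ hc]
        simp
      rw [hins, PySem.Set.add_of_not_mem hmem]
      refine ih (s ++ [a]) ?_
      have hd : ∀ x ∈ s, ¬ x = a := fun x hx h => hmem (h ▸ hx)
      simpa [List.nodup_append, hs] using hd

-- ofList commutes with filter.
lemma ofList_filter (p : Int → Bool) :
    ∀ (l : List Int), PySem.Set.ofList (l.filter p) = (PySem.Set.ofList l).filter p := by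
  intro l
  induction l with
  | nil => simp [PySem.Set.ofList]
  | cons a l ih =>
    by_cases hp : p a
    · rw [List.filter_cons_of_pos hp, PySem.Set.ofList_cons, PySem.Set.ofList_cons, ih]
      simp only [PySem.Set.discard, List.filter_cons_of_pos hp, List.filter_filter]
      congr 1
      apply List.filter_congr
      intro x _
      simp [Bool.and_comm]
    · rw [List.filter_cons_of_neg (by simpa using hp), PySem.Set.ofList_cons, ih,
        List.filter_cons_of_neg (by simpa using hp)]
      simp only [PySem.Set.discard, List.filter_filter]
      apply List.filter_congr
      intro x _
      by_cases hx : x = a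
      · subst hx; simp [hp]
      · simp [hx]

lemma count_dublicated_eq (seq : List Int) : count_dublicated seq = dupSpec seq := by
  unfold count_dublicated
  rw [show (fun (res : PySem.Dict Int Int) (i : Int) =>
        let counter : Int := (PySem.List.count seq i : Int)
        if counter > 1 then res.insert i counter else res)
      = (fun res i => if (1:Int) < (PySem.List.count seq i : Int)
          then res.insert i ((PySem.List.count seq i : Int)) else res) from rfl]
  rw [PySem.List.foldl_ite_eq_foldl_filter (fun i => (1:Int) < (PySem.List.count seq i : Int))
    (fun (d : PySem.Dict Int Int) k => d.insert k ((PySem.List.count seq k : Int))) seq PySem.Dict.empty]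
  have := items_foldl_insert_fun (fun k => (PySem.List.count seq k : Int))
    (seq.filter (fun i => decide ((1:Int) < (PySem.List.count seq i : Int)))) [] (by simp)
  unfold dupSpec
  rw [← ofList_filter]
  simpa [PySem.Set.update_nil_left] using this

-- ---------- B side ----------

-- counts of survivors are unchanged by stripping all occurrences of x
lemma count_strip (t : List Int) (x k : Int) (hk : k ≠ x) :
    PySem.List.count (t.filter (fun y => !(y == x))) k = PySem.List.count (x :: t) k := by
  show (t.filter (fun y => !(y == x))).count k = (x :: t).count k
  rw [List.count_filter (by simpa using hk)]
  simp [Ne.symm hk]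

-- the canonical value of x :: t splits into x's entry and that of the stripped worklist
lemma dupSpec_cons (x : Int) (t : List Int) :
    dupSpec (x :: t)
      = (if (1:Int) < (PySem.List.count (x :: t) x : Int)
           then [(x, (PySem.List.count (x :: t) x : Int))] else [])
        ++ dupSpec (t.filter (fun y => !(y == x))) := by
  unfold dupSpec
  have hdis : PySem.Set.discard (PySem.Set.ofList t) x
      = PySem.Set.ofList (t.filter (fun y => !(y == x))) := by
    rw [ofList_filter]; rfl
  have hmemne : ∀ k ∈ PySem.Set.ofList (t.filter (fun y => !(y == x))), k ≠ x := by
    intro k hk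
    rw [PySem.Set.mem_ofList] at hk
    simpa using (List.mem_filter.1 hk).2
  have hfil : (PySem.Set.ofList (t.filter (fun y => !(y == x)))).filter
        (fun k => decide ((1:Int) < (PySem.List.count (x :: t) k : Int)))
      = (PySem.Set.ofList (t.filter (fun y => !(y == x)))).filter
        (fun k => decide ((1:Int) < (PySem.List.count (t.filter (fun y => !(y == x))) k : Int))) := by
    apply List.filter_congr
    intro k hk
    rw [count_strip t x k (hmemne k hk)]
  have hmap : ∀ (l : List Int), (∀ k ∈ l, k ≠ x) →
      l.map (fun k => (k, (PySem.List.count (x :: t) k : Int)))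
        = l.map (fun k => (k, (PySem.List.count (t.filter (fun y => !(y == x))) k : Int))) := by
    intro l hl
    apply List.map_congr_left
    intro k hk
    rw [count_strip t x k (hl k hk)]
  rw [PySem.Set.ofList_cons, List.filter_cons, hdis, hfil]
  by_cases h1 : (1:Int) < (PySem.List.count (x :: t) x : Int)
  · rw [if_pos (by simpa using h1), if_pos h1, List.map_cons]
    congr 1
    exact hmap _ (fun k hk => hmemne k (List.mem_of_mem_filter hk))
  · rw [if_neg (by simpa using h1), if_neg h1, List.nil_append]
    exact hmap _ (fun k hk => hmemne k (List.mem_of_mem_filter hk))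

-- the strip loop over fresh keys appends the canonical value of its worklist
lemma cdStrip_eq (rest : List Int) (res : PySem.Dict Int Int)
    (hfresh : ∀ k ∈ rest, res.contains k = false) :
    cdStrip rest res = res.items ++ dupSpec rest := by
  induction hn : rest.length using Nat.strong_induction_on generalizing rest res with
  | _ n ih =>
  match rest with
  | [] => simp [cdStrip, dupSpec, PySem.Set.ofList]
  | x :: t =>
    rw [cdStrip]
    have hfilter : (x :: t).filter (fun y => !(y == x)) = t.filter (fun y => !(y == x)) := by
      rw [List.filter_cons]; simp
    set c : Int := (PySem.List.count (x :: t) x : Int) with hc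
    have hxfresh : res.contains x = false := hfresh x (List.mem_cons_self)
    have hfresh' : ∀ k ∈ t.filter (fun y => !(y == x)),
        (if c > 1 then res.insert x c else res).contains k = false := by
      intro k hk
      have hkt := List.mem_filter.1 hk
      have hkne : k ≠ x := by simpa using hkt.2
      split
      · rw [PySem.Dict.contains_eq_isSome_get?, PySem.Dict.get?_insert_of_ne _ _ hkne,
          ← PySem.Dict.contains_eq_isSome_get?]
        exact hfresh k (List.mem_cons_of_mem x hkt.1)
      · exact hfresh k (List.mem_cons_of_mem x hkt.1)
    have hitems : (if c > 1 then res.insert x c else res).items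
        = res.items ++ (if c > 1 then [(x, c)] else []) := by
      split
      · exact PySem.Dict.items_insert_of_not_contains _ _ hxfresh
      · simp
    rw [hfilter, ih _ (by subst hn; exact Nat.lt_succ_of_le (List.length_filter_le _ t)) _ _
        hfresh' rfl, hitems, dupSpec_cons, List.append_assoc]

-- ===== VERDICT (by name: the statement is the Claim_ definition above) =====
theorem count_dublicated_spec : Claim_equal_count_dublicated := by
  intro seq _
  unfold Spec_count_dublicated count_dublicated_alt
  rw [count_dublicated_eq, cdStrip_eq seq PySem.Dict.empty (by intro k _; rfl)]
  rfl
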